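-- pv_equiv track=rewrite | github.com/user171717x/pycheckioorg | ELECTRONIC_STATION/words-order.py | words_order
-- ===== SOURCE A (Python) =====
-- def words_order(text: str, words: list) -> bool:
--     text = text.split()
--     if len(words) > len(set(words)):
--         return False
--     for word in words:
--         if text.count(word) == 0:
--             return False
--     idx = 0
--     for word in words:
--         idx_now = text.index(word)
--         if idx_now >= idx:
--             idx = idx_now
--         else:
--             return False
--     return True
-- ===== SOURCE B (Python) =====
-- def words_order(text: str, words: list) -> bool:
--     wanted = set(words)
--     canon = []
--     for tok in text.split():
--         if tok in wanted and tok not in canon: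
--             canon.append(tok)
--     return canon == words
-- ===== Notes on version B (the rewrite author's own statement) =====
-- stated objective: alternative
-- what changed: B makes one pass over the split text collecting the first occurrence of each wanted word into a canonical sequence and returns whether that sequence equals words, replacing A's duplicate-count check plus per-word count/index scans with a monotone-index loop.
import Mathlib
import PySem

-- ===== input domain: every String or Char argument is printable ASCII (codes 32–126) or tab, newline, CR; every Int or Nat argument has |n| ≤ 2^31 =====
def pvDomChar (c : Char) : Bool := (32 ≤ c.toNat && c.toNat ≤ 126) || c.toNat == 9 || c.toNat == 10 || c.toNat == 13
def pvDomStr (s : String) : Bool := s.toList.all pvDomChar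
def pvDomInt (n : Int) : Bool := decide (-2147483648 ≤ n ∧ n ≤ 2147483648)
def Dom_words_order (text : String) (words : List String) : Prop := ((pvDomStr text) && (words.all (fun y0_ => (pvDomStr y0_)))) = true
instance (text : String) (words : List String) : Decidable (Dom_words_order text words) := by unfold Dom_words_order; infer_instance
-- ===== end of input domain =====

-- B builds, in one pass over the tokens, the canonical sequence of wanted words in
-- first-occurrence text order and compares it to `words` by list equality, replacing A's
-- duplicate check plus per-word count/index scans with a monotone-index loop (objective: alternative).

-- ===== PORT A =====
-- 'for word in words: if text.count(word) == 0: return False'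
def woCheckAll (tokens : List String) : List String → Bool
  | [] => true
  | w :: ws => if PySem.List.count tokens w == 0 then false else woCheckAll tokens ws

-- 'idx = 0; for word in words: idx_now = text.index(word); …'
-- (the 'none' branch is unreachable after woCheckAll succeeded; Python's list.index would raise ValueError there)
def woCheckOrder (tokens : List String) (idx : Nat) : List String → Bool
  | [] => true
  | w :: ws =>
    match PySem.List.index? tokens w with
    | none => false
    | some idxNow => if idxNow ≥ idx then woCheckOrder tokens idxNow ws else false

def words_order (text : String) (words : List String) : Bool :=
  let tokens := PySem.Str.split₀ text
  if words.length > (PySem.Set.ofList words).length then false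
  else if woCheckAll tokens words then woCheckOrder tokens 0 words
  else false

-- ===== PORT B =====
-- 'canon = []; for tok in text.split(): if tok in wanted and tok not in canon: canon.append(tok); return canon == words'
def words_order_alt (text : String) (words : List String) : Bool :=
  let wanted : PySem.Set String := PySem.Set.ofList words
  let canon := (PySem.Str.split₀ text).foldl
    (fun acc tok => if wanted.contains tok && !acc.contains tok then acc ++ [tok] else acc) []
  canon == words

-- ===== PRECONDITION & SPEC =====
def Spec_words_order (text : String) (words : List String) (out : Bool) : Prop := out = words_order_alt text words
instance (text : String) (words : List String) (out : Bool) : Decidable (Spec_words_order text words out) := by unfold Spec_words_order; infer_instance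

-- ===== CLAIM (what is proved, stated in full; the proofs are below) =====
def Claim_equal_words_order : Prop := ∀ (text : String) (words : List String), Dom_words_order text words → Spec_words_order text words (words_order text words)

-- ===== LEMMAS AND PROOFS =====

-- the first index of w among the tokens (0 when absent; used only on members)
def woKey (tokens : List String) (w : String) : Nat := (PySem.List.index? tokens w).getD 0

-- Set.ofList's fold, started from a duplicate-free accumulator
theorem woFoldlAdd (xs : List String) : ∀ (acc : List String), acc.Nodup →
    xs.foldl PySem.Set.add acc = acc ++ (PySem.Set.ofList xs).filter (fun t => !acc.contains t) := by
  induction xs with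
  | nil => intro acc _; simp [PySem.Set.ofList, PySem.Set.empty]
  | cons x xs ih =>
    intro acc hnd
    have hofl : PySem.Set.ofList (x :: xs) = List.foldl PySem.Set.add [x] xs := by
      simp [PySem.Set.ofList, PySem.Set.empty, PySem.Set.add]
    have h1 : List.foldl PySem.Set.add [x] xs
        = [x] ++ (PySem.Set.ofList xs).filter (fun t => !([x].contains t)) :=
      ih [x] (List.nodup_singleton x)
    rw [List.foldl_cons]
    by_cases hx : acc.contains x = true
    · have hmemX : x ∈ acc := by simpa using hx
      have hadd : PySem.Set.add acc x = acc := by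
        simp only [PySem.Set.add, PySem.Set.contains, hx, if_pos]
      rw [hadd, ih acc hnd, hofl, h1]
      have hcx : (!acc.contains x) = false := by simp only [hx, Bool.not_true]
      simp only [List.filter_append, List.filter_cons, List.filter_filter, hcx]
      simp only [Bool.false_eq_true, if_false]
      congr 1
      apply List.filter_congr
      intro t _
      by_cases ht : t = x
      · subst ht; simp; exact hmemX
      · simp [ht]
    · have hmem : x ∉ acc := by simpa using hx
      have hadd : PySem.Set.add acc x = acc ++ [x] := by
        unfold PySem.Set.add PySem.Set.contains
        rw [if_neg]
        simp
        exact hmem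
      have hnd' : (acc ++ [x]).Nodup := by
        refine List.Nodup.append hnd (List.nodup_singleton x) ?_
        intro a ha hb
        simp only [List.mem_singleton] at hb
        subst hb; exact hmem ha
      rw [hadd, ih _ hnd', hofl, h1]
      have hcx : (!acc.contains x) = true := by simp; exact hmem
      simp only [List.filter_append, List.filter_cons, List.filter_filter, hcx, if_pos]
      simp only [List.append_assoc, List.singleton_append]
      congr 2
      apply List.filter_congr
      intro t _
      by_cases ht : t = x
      · subst ht; simp
      · simp [ht]

theorem woOfListCons (x : String) (xs : List String) :
    PySem.Set.ofList (x :: xs) = [x] ++ (PySem.Set.ofList xs).filter (fun t => !([x].contains t)) := by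
  have hofl : PySem.Set.ofList (x :: xs) = List.foldl PySem.Set.add [x] xs := by
    simp [PySem.Set.ofList, PySem.Set.empty, PySem.Set.add]
  rw [hofl, woFoldlAdd xs [x] (List.nodup_singleton x)]

theorem woKey_cons_of_ne (x b : String) (xs : List String) (hne : x ≠ b) (hb : b ∈ xs) :
    woKey (x :: xs) b = woKey xs b + 1 := by
  unfold woKey
  rw [PySem.List.index?_cons_of_ne xs hne]
  obtain ⟨i, hi⟩ := Option.isSome_iff_exists.mp ((PySem.List.index?_isSome_iff xs b).mpr hb)
  rw [hi]; rfl

-- the ordered dedup of the tokens is strictly sorted by first index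
theorem woOfListSorted (xs : List String) :
    (PySem.Set.ofList xs).Pairwise (fun a b => woKey xs a < woKey xs b) := by
  induction xs with
  | nil => simp [PySem.Set.ofList, PySem.Set.empty]
  | cons x xs ih =>
    rw [woOfListCons, List.singleton_append, List.pairwise_cons]
    constructor
    · intro b hb
      have hb' := List.of_mem_filter hb
      have hbx : b ≠ x := by simpa using hb'
      have hbm : b ∈ xs := (PySem.Set.mem_ofList xs b).mp (List.mem_of_mem_filter hb)
      have h1 : woKey (x :: xs) x = 0 := by
        unfold woKey; rw [PySem.List.index?_cons_self]; rfl
      rw [h1, woKey_cons_of_ne x b xs (Ne.symm hbx) hbm]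
      omega
    · refine List.Pairwise.imp_of_mem ?_ (List.Pairwise.filter _ ih)
      intro a b ha hb hlt
      have hax : a ≠ x := by simpa using List.of_mem_filter ha
      have hbx : b ≠ x := by simpa using List.of_mem_filter hb
      have ham : a ∈ xs := (PySem.Set.mem_ofList xs a).mp (List.mem_of_mem_filter ha)
      have hbm : b ∈ xs := (PySem.Set.mem_ofList xs b).mp (List.mem_of_mem_filter hb)
      rw [woKey_cons_of_ne x a xs (Ne.symm hax) ham, woKey_cons_of_ne x b xs (Ne.symm hbx) hbm]
      omega

-- A's duplicate check: |set(ws)| = |ws| exactly for duplicate-free ws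
theorem woLen (xs : List String) :
    (PySem.Set.ofList xs).length ≤ xs.length ∧ ((PySem.Set.ofList xs).length = xs.length ↔ xs.Nodup) := by
  induction xs with
  | nil => simp [PySem.Set.ofList, PySem.Set.empty]
  | cons x xs ih =>
    obtain ⟨hle, hiff⟩ := ih
    rw [woOfListCons, List.singleton_append]
    by_cases hx : x ∈ xs
    · have hxo : x ∈ PySem.Set.ofList xs := (PySem.Set.mem_ofList xs x).mpr hx
      have hlt : ((PySem.Set.ofList xs).filter (fun t => !([x].contains t))).length < (PySem.Set.ofList xs).length := by
        rw [List.length_filter_lt_length_iff_exists]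
        exact ⟨x, hxo, by simp⟩
      constructor
      · simp only [List.length_cons]; omega
      · constructor
        · intro h; simp only [List.length_cons] at h; omega
        · intro h; exact absurd hx (List.nodup_cons.mp h).1
    · have hfe : (PySem.Set.ofList xs).filter (fun t => !([x].contains t)) = PySem.Set.ofList xs := by
        rw [List.filter_eq_self]
        intro a ha
        have ham : a ∈ xs := (PySem.Set.mem_ofList xs a).mp ha
        have : a ≠ x := by rintro rfl; exact hx ham
        simp [this]
      rw [hfe]
      constructor
      · simp only [List.length_cons]; omega
      · simp only [List.length_cons, List.nodup_cons, Nat.add_right_cancel_iff]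
        rw [hiff]; tauto

-- A's count loop succeeds exactly when every word is a token
theorem woCheckAll_iff (tokens ws : List String) : woCheckAll tokens ws = true ↔ ∀ w ∈ ws, w ∈ tokens := by
  induction ws with
  | nil => simp [woCheckAll]
  | cons w ws ih =>
    rw [woCheckAll]
    by_cases hw : w ∈ tokens
    · have : (PySem.List.count tokens w == 0) = false := by
        rw [PySem.List.count_eq]
        simp [List.count_eq_zero, hw]
      rw [this]
      simp only [Bool.false_eq_true, if_false, ih]
      simp [hw]
    · have : (PySem.List.count tokens w == 0) = true := by
        rw [PySem.List.count_eq]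
        simp [List.count_eq_zero, hw]
      rw [this]
      simp [hw]

-- A's index loop: head bounded below by idx, adjacent first indices non-decreasing
theorem woCheckOrder_iff (tokens : List String) (ws : List String) (idx : Nat)
    (hmem : ∀ w ∈ ws, w ∈ tokens) :
    woCheckOrder tokens idx ws = true ↔
      (∀ w ∈ ws.head?, idx ≤ woKey tokens w) ∧ ws.IsChain (fun a b => woKey tokens a ≤ woKey tokens b) := by
  induction ws generalizing idx with
  | nil => simp [woCheckOrder]
  | cons w ws ih =>
    have hw : w ∈ tokens := hmem w (List.mem_cons_self)
    obtain ⟨i, hi⟩ := Option.isSome_iff_exists.mp ((PySem.List.index?_isSome_iff tokens w).mpr hw)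
    have hkey : woKey tokens w = i := by unfold woKey; rw [hi]; rfl
    rw [woCheckOrder, hi]
    dsimp only
    by_cases hge : i ≥ idx
    · rw [if_pos hge, ih i (fun v hv => hmem v (List.mem_cons_of_mem w hv)), List.isChain_cons]
      simp only [List.head?_cons, Option.mem_def, Option.some.injEq, forall_eq', hkey]
      tauto
    · rw [if_neg hge]
      simp only [List.head?_cons, Option.mem_def, Option.some.injEq, forall_eq', hkey]
      constructor
      · intro h; exact absurd h (by simp)
      · intro ⟨h, _⟩; omega

-- first index is injective on tokens
theorem woKey_inj (tokens : List String) {a b : String} (ha : a ∈ tokens) (hb : b ∈ tokens)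
    (h : woKey tokens a = woKey tokens b) : a = b := by
  obtain ⟨i, hi⟩ := Option.isSome_iff_exists.mp ((PySem.List.index?_isSome_iff tokens a).mpr ha)
  obtain ⟨j, hj⟩ := Option.isSome_iff_exists.mp ((PySem.List.index?_isSome_iff tokens b).mpr hb)
  have hk : i = j := by unfold woKey at h; rw [hi, hj] at h; simpa using h
  subst hk
  obtain ⟨hlt, hga, _⟩ := PySem.List.getElem_of_index?_eq_some hi
  obtain ⟨hlt', hgb, _⟩ := PySem.List.getElem_of_index?_eq_some hj
  rw [← hga, ← hgb]

-- a ≤-chain is ≤-pairwise (no Trans instance needed for this ad-hoc relation)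
theorem woChainPairwise (f : String → Nat) : ∀ (ws : List String),
    ws.IsChain (fun a b => f a ≤ f b) → ws.Pairwise (fun a b => f a ≤ f b) := by
  intro ws h
  induction ws with
  | nil => exact List.Pairwise.nil
  | cons x l ih =>
    rw [List.isChain_cons] at h
    obtain ⟨hhead, hl⟩ := h
    have pl := ih hl
    rw [List.pairwise_cons]
    refine ⟨?_, pl⟩
    intro b hb
    cases l with
    | nil => simp at hb
    | cons y m =>
      have hxy : f x ≤ f y := hhead y rfl
      rcases List.mem_cons.mp hb with h | h
      · subst h; exact hxy
      · exact le_trans hxy ((List.pairwise_cons.mp pl).1 b h)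

-- B's loop computes the first-occurrence dedup of the tokens filtered to the wanted words
theorem woCanonEq (wanted : List String) (xs : List String) : ∀ (acc : List String), acc.Nodup →
    xs.foldl (fun acc tok => if PySem.Set.contains wanted tok && !acc.contains tok then acc ++ [tok] else acc) acc
      = acc ++ (PySem.Set.ofList xs).filter (fun t => PySem.Set.contains wanted t && !acc.contains t) := by
  induction xs with
  | nil => intro acc _; simp [PySem.Set.ofList, PySem.Set.empty]
  | cons x xs ih =>
    intro acc hnd
    rw [List.foldl_cons, woOfListCons, List.singleton_append, List.filter_cons]
    by_cases hc : (PySem.Set.contains wanted x && !acc.contains x) = true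
    · rw [if_pos hc, if_pos hc]
      have hmem : x ∉ acc := by
        have := (Bool.and_eq_true _ _).mp hc
        simpa using this.2
      have hnd' : (acc ++ [x]).Nodup := by
        refine List.Nodup.append hnd (List.nodup_singleton x) ?_
        intro a ha hb
        simp only [List.mem_singleton] at hb
        subst hb; exact hmem ha
      rw [ih _ hnd']
      simp only [List.filter_filter, List.append_assoc, List.singleton_append]
      congr 2
      apply List.filter_congr
      intro t _
      by_cases ht : t = x
      · subst ht; simp
      · simp [List.contains_append, ht, Bool.and_assoc]
    · rw [if_neg hc, if_neg hc]
      rw [ih _ hnd]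
      simp only [List.filter_filter]
      congr 1
      apply List.filter_congr
      intro t _
      by_cases ht : t = x
      · subst ht
        simp only [Bool.and_eq_true, Bool.not_eq_true'] at hc
        simp [PySem.Set.contains]
        intro hw
        by_contra hna
        exact hc ⟨by simpa [PySem.Set.contains] using hw, by simpa using hna⟩
      · simp [ht]

-- A = B, the assembled equivalence
theorem woMain (text : String) (words : List String) :
    words_order text words = words_order_alt text words := by
  unfold words_order words_order_alt
  simp only []
  have hcanon : (PySem.Str.split₀ text).foldl
      (fun acc tok => if (PySem.Set.ofList words).contains tok && !acc.contains tok then acc ++ [tok] else acc) []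
      = (PySem.Set.ofList (PySem.Str.split₀ text)).filter (fun t => PySem.Set.contains (PySem.Set.ofList words) t) := by
    rw [woCanonEq (PySem.Set.ofList words) (PySem.Str.split₀ text) [] List.nodup_nil]
    simp
  rw [hcanon]
  set tokens := PySem.Str.split₀ text with htok
  set canon := (PySem.Set.ofList tokens).filter (fun t => PySem.Set.contains (PySem.Set.ofList words) t) with hcan
  have hcnd : canon.Nodup := List.Nodup.filter _ (PySem.Set.nodup_ofList tokens)
  have hcsort : canon.Pairwise (fun a b => woKey tokens a < woKey tokens b) :=
    List.Pairwise.filter _ (woOfListSorted tokens)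
  have hmemc : ∀ t, t ∈ canon ↔ t ∈ tokens ∧ t ∈ words := by
    intro t
    rw [hcan, List.mem_filter, PySem.Set.mem_ofList]
    simp [PySem.Set.contains, PySem.Set.mem_ofList]
  by_cases hdup : words.length > (PySem.Set.ofList words).length
  · rw [if_pos hdup]
    have hwnd : ¬ words.Nodup := by
      intro h
      have := (woLen words).2.mpr h
      omega
    symm
    rw [beq_eq_false_iff_ne]
    intro h
    exact hwnd (h ▸ hcnd)
  · rw [if_neg hdup]
    have hnd : words.Nodup := (woLen words).2.mp (by have := (woLen words).1; omega)
    by_cases hall : woCheckAll tokens words = true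
    · rw [if_pos hall]
      have hmem : ∀ w ∈ words, w ∈ tokens := (woCheckAll_iff _ _).mp hall
      apply Bool.coe_iff_coe.mp
      rw [woCheckOrder_iff tokens words 0 hmem, beq_iff_eq]
      constructor
      · rintro ⟨-, hchain⟩
        have hpw : words.Pairwise (fun a b => woKey tokens a < woKey tokens b) := by
          refine List.Pairwise.imp_of_mem ?_ ((woChainPairwise _ _ hchain).and hnd)
          rintro a b ha hb ⟨hle, hne⟩
          rcases Nat.lt_or_ge (woKey tokens a) (woKey tokens b) with h | h
          · exact h
          · exact absurd (woKey_inj tokens (hmem a ha) (hmem b hb) (by omega)) hne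
        have hperm : words.Perm canon := by
          refine List.perm_of_nodup_nodup_toFinset_eq hnd hcnd ?_
          ext x
          simp only [List.mem_toFinset, hmemc]
          exact ⟨fun hx => ⟨hmem x hx, hx⟩, fun hx => hx.2⟩
        exact (List.Perm.eq_of_pairwise
          (fun a b _ _ h1 h2 => absurd h2 (by omega)) hpw hcsort hperm).symm
      · intro h
        have hpw : words.Pairwise (fun a b => woKey tokens a < woKey tokens b) := h ▸ hcsort
        refine ⟨by simp, ?_⟩
        exact List.Pairwise.isChain (hpw.imp (fun h => Nat.le_of_lt h))
    · rw [if_neg hall]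
      have : ∃ w ∈ words, w ∉ tokens := by
        by_contra hcon
        push_neg at hcon
        exact hall ((woCheckAll_iff _ _).mpr hcon)
      obtain ⟨w, hw, hwt⟩ := this
      symm
      rw [beq_eq_false_iff_ne]
      intro h
      exact hwt ((hmemc w).mp (h ▸ hw)).1

-- ===== VERDICT (by name: the statement is the Claim_ definition above) =====
theorem words_order_spec : Claim_equal_words_order := by
  intro text words _
  unfold Spec_words_order
  exact woMain text words
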